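-- pv_equiv track=rewrite | github.com/KAfable/Graphs | word_challenge/words.py | words_are_neighbors2
-- ===== SOURCE A (Python) =====
-- def words_are_neighbors2(word1, word2):
--     for i in range(len(word1)):
--         list_word1 = list(word1)
--         list_word2 = list(word2)
--         list_word1.pop(i)
--         list_word2.pop(i)
--         if list_word1 == list_word2:
--             return True
--     return False
-- ===== SOURCE B (Python) =====
-- def words_are_neighbors2(word1, word2):
--     if len(word1) != len(word2) or not word1:
--         return False
--     mismatches = 0
--     for c1, c2 in zip(word1, word2):
--         if c1 != c2:
--             mismatches += 1
--             if mismatches > 1: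
--                 return False
--     return True
-- ===== Notes on version B (the rewrite author's own statement) =====
-- stated objective: faster
-- what changed: Instead of rebuilding both words as lists and popping index i for every i (quadratic), B makes one zip pass counting mismatched positions and answers True iff the lengths are equal, the words are nonempty and at most one position differs.
import Mathlib
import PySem

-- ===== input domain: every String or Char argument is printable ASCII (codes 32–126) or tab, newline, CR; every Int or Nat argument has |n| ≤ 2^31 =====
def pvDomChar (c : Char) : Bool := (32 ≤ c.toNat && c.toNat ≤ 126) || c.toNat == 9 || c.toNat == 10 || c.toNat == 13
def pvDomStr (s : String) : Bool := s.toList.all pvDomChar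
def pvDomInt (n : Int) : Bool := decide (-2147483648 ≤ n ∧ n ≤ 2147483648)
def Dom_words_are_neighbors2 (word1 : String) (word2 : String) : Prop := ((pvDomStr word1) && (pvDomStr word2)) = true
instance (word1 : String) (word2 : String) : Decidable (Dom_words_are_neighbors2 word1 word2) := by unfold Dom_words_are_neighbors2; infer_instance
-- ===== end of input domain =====

-- B replaces A's per-index list rebuilding and popping with a single zip pass counting
-- mismatched positions (objective: faster, O(n) instead of O(n^2)).

-- ===== PORT A =====
-- Python loop: for i in range(len(word1)): pop i from fresh copies of both words, return True on equality.
-- `none` from pop? is Python's IndexError (excluded by Pre_).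
def pvAuxA (l1 l2 : List Char) : List Int → Bool
  | [] => false
  | i :: rest =>
    match PySem.List.pop? l1 i, PySem.List.pop? l2 i with
    | some (_, r1), some (_, r2) => if r1 = r2 then true else pvAuxA l1 l2 rest
    | _, _ => false

def words_are_neighbors2 (word1 : String) (word2 : String) : Bool :=
  pvAuxA word1.toList word2.toList (PySem.List.pyRange 0 (PySem.Str.len word1) 1)

-- ===== PORT B =====
-- one pass over zip(word1, word2), early exit after a second mismatch
def pvBLoop : List (Char × Char) → Nat → Bool
  | [], _ => true
  | (c1, c2) :: rest, m =>
    if c1 ≠ c2 then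
      if m + 1 > 1 then false else pvBLoop rest (m + 1)
    else pvBLoop rest m

def words_are_neighbors2_alt (word1 : String) (word2 : String) : Bool :=
  if word1.toList.length ≠ word2.toList.length ∨ word1.toList = [] then false
  else pvBLoop (word1.toList.zip word2.toList) 0

-- ===== PRECONDITION & SPEC =====
-- Pre_ excludes exactly the inputs where A raises IndexError: word1 longer than word2.
def Pre_words_are_neighbors2 (word1 : String) (word2 : String) : Prop :=
  word1.toList.length ≤ word2.toList.length
instance (word1 : String) (word2 : String) : Decidable (Pre_words_are_neighbors2 word1 word2) := by
  unfold Pre_words_are_neighbors2; infer_instance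

def pvWitness_words_are_neighbors2 : String × String := ("cat", "cab")

def Spec_words_are_neighbors2 (word1 : String) (word2 : String) (out : Bool) : Prop := out = words_are_neighbors2_alt word1 word2
instance (word1 : String) (word2 : String) (out : Bool) : Decidable (Spec_words_are_neighbors2 word1 word2 out) := by unfold Spec_words_are_neighbors2; infer_instance

-- ===== CLAIM (what is proved, stated in full; the proofs are below) =====
def Claim_equal_words_are_neighbors2 : Prop := ∀ (word1 : String) (word2 : String), Dom_words_are_neighbors2 word1 word2 → Pre_words_are_neighbors2 word1 word2 → Spec_words_are_neighbors2 word1 word2 (words_are_neighbors2 word1 word2)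

-- ===== LEMMAS AND PROOFS =====

-- zip of a list with itself never mismatches
lemma pvBLoop_zip_self (l : List Char) (m : Nat) : pvBLoop (l.zip l) m = true := by
  induction l generalizing m with
  | nil => rfl
  | cons a l ih => simp [pvBLoop, ih]

-- with one mismatch already seen, pvBLoop is an equality test (for equal-length lists)
lemma pvBLoop_one (l1 l2 : List Char) (h : l1.length = l2.length) :
    pvBLoop (l1.zip l2) 1 = decide (l1 = l2) := by
  induction l1 generalizing l2 with
  | nil => cases l2 with
    | nil => rfl
    | cons b l2 => simp at h
  | cons a l1 ih =>
    cases l2 with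
    | nil => simp at h
    | cons b l2 =>
      simp only [List.length_cons, Nat.add_right_cancel_iff] at h
      by_cases hab : a = b
      · subst hab
        simp [pvBLoop, ih l2 h]
      · simp [pvBLoop, hab]

-- A's loop returns false when every index points into l1 but the lists have different lengths
lemma pvAuxA_ne_len (l1 l2 : List Char) (hlt : l1.length < l2.length) (is : List Int)
    (h : ∀ i ∈ is, 0 ≤ i ∧ i < l1.length) : pvAuxA l1 l2 is = false := by
  induction is with
  | nil => rfl
  | cons i rest ih =>
    obtain ⟨h0, h1⟩ := h i (List.mem_cons_self ..)
    obtain ⟨n, rfl⟩ := Int.eq_ofNat_of_zero_le h0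
    have hn1 : n < l1.length := by exact_mod_cast h1
    have hn2 : n < l2.length := lt_trans hn1 hlt
    rw [pvAuxA, PySem.List.pop?_natCast _ _ hn1, PySem.List.pop?_natCast _ _ hn2]
    have hne : l1.eraseIdx n ≠ l2.eraseIdx n := by
      intro he
      have := congrArg List.length he
      rw [List.length_eraseIdx_of_lt hn1, List.length_eraseIdx_of_lt hn2] at this
      omega
    simp only [hne, if_false]
    exact ih (fun j hj => h j (List.mem_cons_of_mem _ hj))

-- unfold one loop iteration once both pops are known to succeed
lemma pvAuxA_cons_eq (l1 l2 : List Char) (i : Int) (rest : List Int)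
    (x1 x2 : Char) (r1 r2 : List Char)
    (h1 : PySem.List.pop? l1 i = some (x1, r1)) (h2 : PySem.List.pop? l2 i = some (x2, r2)) :
    pvAuxA l1 l2 (i :: rest) = if r1 = r2 then true else pvAuxA l1 l2 rest := by
  rw [pvAuxA, h1, h2]

-- shifting A's loop one position into both lists (indices all >= 1 and in range)
lemma pvAuxA_shift (a b : Char) (l1 l2 : List Char) (hlen : l1.length = l2.length)
    (is : List Int) (h : ∀ i ∈ is, 1 ≤ i ∧ i < (l1.length : Int) + 1) :
    pvAuxA (a :: l1) (b :: l2) is =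
      if a = b then pvAuxA l1 l2 (is.map (· - 1)) else false := by
  induction is with
  | nil => simp [pvAuxA]
  | cons i rest ih =>
    obtain ⟨h1, h2⟩ := h i (List.mem_cons_self ..)
    obtain ⟨n, rfl⟩ := Int.eq_ofNat_of_zero_le (by omega : (0 : Int) ≤ i)
    cases n with
    | zero => omega
    | succ m =>
      have hm : m < l1.length := by omega
      have hm2 : m < l2.length := by omega
      have hlt1 : m + 1 < (a :: l1).length := by simp; omega
      have hlt2 : m + 1 < (b :: l2).length := by simp; omega
      have hpop1 := PySem.List.pop?_natCast (a :: l1) (m + 1) hlt1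
      have hpop2 := PySem.List.pop?_natCast (b :: l2) (m + 1) hlt2
      rw [List.eraseIdx_cons_succ] at hpop1 hpop2
      rw [pvAuxA_cons_eq _ _ _ _ _ _ _ _ hpop1 hpop2]
      have ihr := ih (fun j hj => h j (List.mem_cons_of_mem _ hj))
      by_cases hab : a = b
      · subst hab
        rw [if_pos rfl] at ihr ⊢
        rw [List.map_cons, show ((m + 1 : Nat) : Int) - 1 = ((m : Nat) : Int) by omega]
        rw [pvAuxA_cons_eq _ _ _ _ _ _ _ _ (PySem.List.pop?_natCast _ _ hm) (PySem.List.pop?_natCast _ _ hm2)]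
        simp only [List.cons.injEq, true_and]
        split
        · rfl
        · exact ihr
      · have hne : ¬ (a :: l1.eraseIdx m = b :: l2.eraseIdx m) := by simp [hab]
        rw [if_neg hne, if_neg hab]
        rw [ihr, if_neg hab]

-- main characterisation: on equal-length lists, A's loop = B's loop (guarded by nonemptiness)
lemma pvAuxA_eq_b (l1 l2 : List Char) (hlen : l1.length = l2.length) :
    pvAuxA l1 l2 (PySem.List.pyRange 0 l1.length 1) =
      if l1 = [] then false else pvBLoop (l1.zip l2) 0 := by
  induction l1 generalizing l2 with
  | nil => simp [pvAuxA]
  | cons a l1 ih =>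
    cases l2 with
    | nil => simp at hlen
    | cons b l2 =>
      simp only [List.length_cons, Nat.add_right_cancel_iff] at hlen
      rw [show ((a :: l1).length : Int) = (l1.length : Int) + 1 by simp]
      have hcons : PySem.List.pyRange 0 ((l1.length : Int) + 1) 1 =
          0 :: PySem.List.pyRange 1 ((l1.length : Int) + 1) 1 :=
        PySem.List.pyRange_one_cons (by omega)
      have hmap : (PySem.List.pyRange 1 ((l1.length : Int) + 1) 1).map (· - 1) =
          PySem.List.pyRange 0 (l1.length : Int) 1 := by
        rw [PySem.List.pyRange_one, PySem.List.pyRange_one]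
        simp only [List.map_map]
        rw [show ((l1.length : Int) + 1 - 1).toNat = ((l1.length : Int) - 0).toNat by omega]
        apply List.map_congr_left
        intro k _
        simp only [Function.comp_apply]
        omega
      have hshift := pvAuxA_shift a b l1 l2 hlen
        (PySem.List.pyRange 1 ((l1.length : Int) + 1) 1)
        (by intro i hi; rw [PySem.List.mem_pyRange_one] at hi; omega)
      have hpop1 : PySem.List.pop? (a :: l1) 0 = some (a, l1) := by
        rw [show (0 : Int) = ((0 : Nat) : Int) by rfl, PySem.List.pop?_natCast _ _ (by simp)]
        simp
      have hpop2 : PySem.List.pop? (b :: l2) 0 = some (b, l2) := by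
        rw [show (0 : Int) = ((0 : Nat) : Int) by rfl, PySem.List.pop?_natCast _ _ (by simp)]
        simp
      rw [hcons, pvAuxA_cons_eq _ _ _ _ _ _ _ _ hpop1 hpop2]
      by_cases hab : a = b
      · subst hab
        by_cases heq : l1 = l2
        · subst heq
          simp [pvBLoop, pvBLoop_zip_self]
        · rw [if_neg heq, hshift, if_pos rfl, hmap, ih l2 hlen]
          have hne : l1 ≠ [] := by
            rintro rfl
            exact heq (List.length_eq_zero_iff.mp hlen.symm).symm
          simp [pvBLoop, hne]
      · by_cases heq : l1 = l2
        · subst heq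
          simp [pvBLoop, hab, pvBLoop_zip_self]
        · rw [if_neg heq, hshift, if_neg hab]
          simp [pvBLoop, hab, pvBLoop_one l1 l2 hlen, heq]

-- ===== VERDICT (by name: the statement is the Claim_ definition above) =====
theorem words_are_neighbors2_spec : Claim_equal_words_are_neighbors2 := by
  intro word1 word2 _ hpre
  unfold Spec_words_are_neighbors2 words_are_neighbors2 words_are_neighbors2_alt
  unfold Pre_words_are_neighbors2 at hpre
  rw [PySem.Str.len_eq]
  rcases lt_or_eq_of_le hpre with hlt | heq
  · rw [pvAuxA_ne_len _ _ hlt _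
      (by intro i hi; rw [PySem.List.mem_pyRange_one] at hi; omega)]
    rw [if_pos (Or.inl (by omega))]
  · rw [pvAuxA_eq_b _ _ heq]
    by_cases hnil : word1.toList = []
    · simp [hnil]
    · rw [if_neg hnil, if_neg (by rintro (h | h) <;> [exact h heq; exact hnil h])]
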